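-- pv_equiv track=rewrite | github.com/ggtcha/Projectrag2 | backend/src/ingestion.py | detect_device_category
-- ===== SOURCE A (Python) =====
-- def detect_device_category(model: str) -> str:
--     """ตรวจจับประเภทอุปกรณ์จาก model name"""
--     if not model:
--         return "อุปกรณ์ IT อื่นๆ"
--
--     m = model.lower()
--
--     if any(x in m for x in ["thinkpad", "laptop", "elitebook", "notebook"]):
--         return "Laptop/Notebook"
--     if any(x in m for x in ["thinkcentre", "optiplex", "prodesk", "desktop"]):
--         return "Desktop PC"
--     if "printer" in m:
--         return "Printer"
--     if "switch" in m:
--         return "Network Switch"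
--     if "extender" in m:
--         return "Network Extender"
--     if "router" in m:
--         return "Router"
--     if "scanner" in m:
--         return "Scanner"
--     if "ups" in m:
--         return "UPS"
--
--     return "อุปกรณ์ IT"
-- ===== SOURCE B (Python) =====
-- # Position-scan matcher: walk the lowercased string once, collect every matched
-- # category into a set, then resolve by the fixed priority order.
-- KEYWORDS = [
--     ("thinkpad", "Laptop/Notebook"), ("laptop", "Laptop/Notebook"),
--     ("elitebook", "Laptop/Notebook"), ("notebook", "Laptop/Notebook"),
--     ("thinkcentre", "Desktop PC"), ("optiplex", "Desktop PC"),
--     ("prodesk", "Desktop PC"), ("desktop", "Desktop PC"),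
--     ("printer", "Printer"), ("switch", "Network Switch"),
--     ("extender", "Network Extender"), ("router", "Router"),
--     ("scanner", "Scanner"), ("ups", "UPS"),
-- ]
-- PRIORITY = ["Laptop/Notebook", "Desktop PC", "Printer", "Network Switch",
--             "Network Extender", "Router", "Scanner", "UPS"]
--
-- def detect_device_category(model: str) -> str:
--     if not model:
--         return "อุปกรณ์ IT อื่นๆ"
--     m = model.lower()
--     matched = set()
--     for i in range(len(m)):
--         for kw, label in KEYWORDS:
--             if m.startswith(kw, i):
--                 matched.add(label)
--     for label in PRIORITY:
--         if label in matched: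
--             return label
--     return "อุปกรณ์ IT"
-- ===== Notes on version B (the rewrite author's own statement) =====
-- stated objective: alternative
-- what changed: Instead of testing each category's keywords with substring searches in an if/return chain, B scans the lowercased string position by position like a naive multi-pattern matcher, collects every category whose keyword starts at some position into a set, and then resolves the set against the fixed priority list.
import Mathlib
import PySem

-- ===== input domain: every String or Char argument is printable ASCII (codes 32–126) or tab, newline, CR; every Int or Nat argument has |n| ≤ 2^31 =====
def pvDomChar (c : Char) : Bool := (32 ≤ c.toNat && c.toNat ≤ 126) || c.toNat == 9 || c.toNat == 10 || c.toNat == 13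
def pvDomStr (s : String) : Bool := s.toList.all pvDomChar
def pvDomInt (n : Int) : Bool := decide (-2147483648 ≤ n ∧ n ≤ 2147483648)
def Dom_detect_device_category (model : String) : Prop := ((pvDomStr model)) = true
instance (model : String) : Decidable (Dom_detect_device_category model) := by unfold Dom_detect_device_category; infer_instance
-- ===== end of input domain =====

-- B replaces A's if/return substring chain by a position-by-position multi-pattern scan that
-- collects all matched categories into a set and then resolves by priority (alternative; same cost).

-- ===== PORT A =====
def detect_device_category (model : String) : String :=
  if model = "" then "อุปกรณ์ IT อื่นๆ"
  else
    let m := PySem.Str.lower model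
    if ["thinkpad", "laptop", "elitebook", "notebook"].any (fun x => PySem.Str.isIn x m) then "Laptop/Notebook"
    else if ["thinkcentre", "optiplex", "prodesk", "desktop"].any (fun x => PySem.Str.isIn x m) then "Desktop PC"
    else if PySem.Str.isIn "printer" m then "Printer"
    else if PySem.Str.isIn "switch" m then "Network Switch"
    else if PySem.Str.isIn "extender" m then "Network Extender"
    else if PySem.Str.isIn "router" m then "Router"
    else if PySem.Str.isIn "scanner" m then "Scanner"
    else if PySem.Str.isIn "ups" m then "UPS"
    else "อุปกรณ์ IT"

-- ===== PORT B =====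
def pvKeywords : List (String × String) :=
  [ ("thinkpad", "Laptop/Notebook"), ("laptop", "Laptop/Notebook"),
    ("elitebook", "Laptop/Notebook"), ("notebook", "Laptop/Notebook"),
    ("thinkcentre", "Desktop PC"), ("optiplex", "Desktop PC"),
    ("prodesk", "Desktop PC"), ("desktop", "Desktop PC"),
    ("printer", "Printer"), ("switch", "Network Switch"),
    ("extender", "Network Extender"), ("router", "Router"),
    ("scanner", "Scanner"), ("ups", "UPS") ]

def pvPriority : List String :=
  ["Laptop/Notebook", "Desktop PC", "Printer", "Network Switch",
   "Network Extender", "Router", "Scanner", "UPS"]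

-- m.startswith(kw, i) ported by hand as "kw.toList is a prefix of m.toList.drop i":
-- exact for 0 ≤ i (the loop only produces such i).
def pvMatched (m : String) : PySem.Set String :=
  (List.range m.toList.length).foldl (fun s i =>
    pvKeywords.foldl (fun s p =>
      if p.1.toList.isPrefixOf (m.toList.drop i) then PySem.Set.add s p.2 else s) s)
    PySem.Set.empty

-- the final for-loop over PRIORITY: first label present in the set, else the default
def pvPick (s : PySem.Set String) : List String → String
  | [] => "อุปกรณ์ IT"
  | l :: rest => if PySem.Set.contains s l then l else pvPick s rest

def detect_device_category_alt (model : String) : String :=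
  if model = "" then "อุปกรณ์ IT อื่นๆ"
  else pvPick (pvMatched (PySem.Str.lower model)) pvPriority

-- ===== PRECONDITION & SPEC =====
def Spec_detect_device_category (model : String) (out : String) : Prop := out = detect_device_category_alt model
instance (model : String) (out : String) : Decidable (Spec_detect_device_category model out) := by unfold Spec_detect_device_category; infer_instance

-- ===== CLAIM =====
def Claim_equal_detect_device_category : Prop := ∀ (model : String), Dom_detect_device_category model → Spec_detect_device_category model (detect_device_category model)

-- ===== LEMMAS AND PROOFS =====

-- membership in the inner (per-position) fold over the keyword table
theorem mem_inner_fold (m : List Char) (i : Nat) (ks : List (String × String))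
    (s : PySem.Set String) (lbl : String) :
    lbl ∈ ks.foldl (fun s p =>
      if p.1.toList.isPrefixOf (m.drop i) then PySem.Set.add s p.2 else s) s ↔
    lbl ∈ s ∨ ∃ p ∈ ks, p.1.toList.isPrefixOf (m.drop i) ∧ p.2 = lbl := by
  induction ks generalizing s with
  | nil => simp
  | cons p ks ih =>
    rw [List.foldl_cons]
    by_cases h : p.1.toList.isPrefixOf (m.drop i)
    · rw [if_pos h, ih, PySem.Set.mem_add, List.exists_mem_cons_iff]
      tauto
    · rw [if_neg h, ih, List.exists_mem_cons_iff]
      have : ¬ (p.1.toList.isPrefixOf (m.drop i) ∧ p.2 = lbl) := fun hc => h hc.1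
      tauto

-- membership in the outer fold over positions
theorem mem_outer_fold (m : List Char) (is : List Nat) (s : PySem.Set String) (lbl : String) :
    lbl ∈ is.foldl (fun s i =>
      pvKeywords.foldl (fun s p =>
        if p.1.toList.isPrefixOf (m.drop i) then PySem.Set.add s p.2 else s) s) s ↔
    lbl ∈ s ∨ ∃ i ∈ is, ∃ p ∈ pvKeywords, p.1.toList.isPrefixOf (m.drop i) ∧ p.2 = lbl := by
  induction is generalizing s with
  | nil => simp
  | cons i is ih =>
    rw [List.foldl_cons, ih, mem_inner_fold, List.exists_mem_cons_iff]
    exact or_assoc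

-- for a nonempty keyword, "starts at some in-range position" = Python's "kw in m"
theorem exists_range_prefix_iff (kw m : String) (hkw : kw.toList ≠ []) :
    (∃ i ∈ List.range m.toList.length, kw.toList.isPrefixOf (m.toList.drop i)) ↔
    PySem.Str.isIn kw m = true := by
  rw [PySem.Str.isIn_eq, ← PySem.Chars.exists_prefix_drop_iff_isIn]
  constructor
  · rintro ⟨i, _, h⟩
    exact ⟨i, List.isPrefixOf_iff_prefix.mp h⟩
  · rintro ⟨j, hj⟩
    by_cases hlt : j < m.toList.length
    · exact ⟨j, List.mem_range.mpr hlt, List.isPrefixOf_iff_prefix.mpr hj⟩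
    · exfalso
      rw [List.drop_eq_nil_of_le (Nat.le_of_not_lt hlt)] at hj
      exact hkw (List.prefix_nil.mp hj)

theorem mem_matched (m : String) (lbl : String) :
    lbl ∈ pvMatched m ↔ ∃ p ∈ pvKeywords, PySem.Str.isIn p.1 m = true ∧ p.2 = lbl := by
  unfold pvMatched
  rw [mem_outer_fold]
  simp only [PySem.Set.empty, List.not_mem_nil, false_or]
  constructor
  · rintro ⟨i, hi, p, hp, hpre, hl⟩
    refine ⟨p, hp, ?_, hl⟩
    refine (exists_range_prefix_iff p.1 m ?_).mp ⟨i, hi, hpre⟩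
    · revert hp; unfold pvKeywords; intro hp
      fin_cases hp <;> simp
  · rintro ⟨p, hp, hin, hl⟩
    have hne : p.1.toList ≠ [] := by
      revert hp; unfold pvKeywords; intro hp; fin_cases hp <;> simp
    obtain ⟨i, hi, hpre⟩ := (exists_range_prefix_iff p.1 m hne).mpr hin
    exact ⟨i, hi, p, hp, hpre, hl⟩

-- contains on the matched set, per label, as the corresponding "any" over that label's keywords
theorem contains_matched (m : String) (lbl : String) :
    PySem.Set.contains (pvMatched m) lbl =
      (pvKeywords.filter (fun p => p.2 == lbl)).any (fun p => PySem.Str.isIn p.1 m) := by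
  rw [Bool.eq_iff_iff, PySem.Set.contains_iff, mem_matched, List.any_eq_true]
  constructor
  · rintro ⟨p, hp, hin, hl⟩
    exact ⟨p, List.mem_filter.mpr ⟨hp, by simp [hl]⟩, hin⟩
  · rintro ⟨p, hp, hin⟩
    obtain ⟨hpk, hpl⟩ := List.mem_filter.mp hp
    exact ⟨p, hpk, hin, by simpa using hpl⟩

-- ===== VERDICT =====
set_option maxHeartbeats 1000000 in
theorem detect_device_category_spec : Claim_equal_detect_device_category := by
  intro model _
  unfold Spec_detect_device_category detect_device_category detect_device_category_alt
  by_cases hm : model = ""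
  · simp [hm]
  · simp only [hm, if_false]
    simp only [pvPriority, pvPick, contains_matched]
    simp [pvKeywords]
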